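-- pv_equiv track=rewrite | github.com/StanfordASL/SSMR-for-control | python/florianworld/utils.py | n_to_grid_size
-- ===== SOURCE A (Python) =====
-- def n_to_grid_size(n):
--     cols = 1
--     rows = 1
--     while n > cols * rows:
--         if cols - rows < 2:  # this number should adapt, but works fine up to ~30
--             cols = cols + 1
--         else:
--             cols = cols - 1
--             rows = rows + 1
--     return rows, cols
-- ===== SOURCE B (Python) =====
-- def n_to_grid_size(n):
--     if n <= 1:
--         return (1, 1)
--     # integer sqrt by bisection: lo*lo <= n < hi*hi
--     lo, hi = 0, n + 1
--     while hi - lo > 1: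
--         mid = (lo + hi) // 2
--         if mid * mid <= n:
--             lo = mid
--         else:
--             hi = mid
--     s = lo
--     k = (s if s * s == n else s + 1) - 1
--     if n <= k * k + k:
--         return (k, k + 1)
--     if n <= k * k + 2 * k:
--         return (k, k + 2)
--     return (k + 1, k + 1)
-- ===== Notes on version B (the rewrite author's own statement) =====
-- stated objective: faster
-- what changed: Replaces A's one-cell-at-a-time spiral growth loop with a closed-form choice among (k,k+1)/(k,k+2)/(k+1,k+1) based on the integer square root of n, computed by bisection.
import Mathlib
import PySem

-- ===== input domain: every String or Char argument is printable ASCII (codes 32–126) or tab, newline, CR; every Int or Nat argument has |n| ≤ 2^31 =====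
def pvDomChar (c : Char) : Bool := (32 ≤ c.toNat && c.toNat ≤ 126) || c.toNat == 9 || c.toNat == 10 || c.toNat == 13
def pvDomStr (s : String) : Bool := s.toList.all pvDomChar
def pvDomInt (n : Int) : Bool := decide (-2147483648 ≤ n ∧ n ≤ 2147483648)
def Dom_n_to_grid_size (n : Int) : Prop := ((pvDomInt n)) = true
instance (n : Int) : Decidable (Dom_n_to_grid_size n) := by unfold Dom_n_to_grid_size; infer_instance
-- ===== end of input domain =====

-- B replaces A's step-by-step growing-spiral loop by a closed form on the integer
-- square root (found by bisection); objective: faster.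

-- termination helper for both loops
lemma pvToNatLt {a b : Int} (h : a < b) (hb : 0 < b) : a.toNat < b.toNat := by omega

-- ===== PORT A =====
-- A's while loop, step for step; the proof arguments (1 ≤ rows ≤ cols, invariants of
-- A's loop from its start state (1,1)) only justify termination.
def pvLoopA (n cols rows : Int) (h1 : 1 ≤ rows) (h2 : rows ≤ cols) : Int × Int :=
  if _h : n > cols * rows then
    if hc : cols - rows < 2 then
      pvLoopA n (cols + 1) rows h1 (by omega)
    else
      pvLoopA n (cols - 1) (rows + 1) (by omega) (by omega)
  else
    (rows, cols)
termination_by (n - cols * rows).toNat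
decreasing_by
  · exact pvToNatLt (by nlinarith) (by linarith)
  · exact pvToNatLt (by nlinarith) (by linarith)

def n_to_grid_size (n : Int) : Int × Int := pvLoopA n 1 1 (by omega) (by omega)

-- ===== PORT B =====
-- bisection for the integer square root: invariant lo*lo ≤ n < hi*hi
def pvIsqrtLoop (n lo hi : Int) : Int :=
  if _h : hi - lo > 1 then
    let mid := PySem.Int.floordiv (lo + hi) 2
    if mid * mid ≤ n then pvIsqrtLoop n mid hi else pvIsqrtLoop n lo mid
  else lo
termination_by (hi - lo).toNat
decreasing_by
  all_goals
    have e : PySem.Int.floordiv (lo + hi) 2 = (lo + hi) / 2 :=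
      PySem.Int.floordiv_eq_ediv_of_pos (by omega)
    exact pvToNatLt (by rw [e]; omega) (by omega)

def n_to_grid_size_alt (n : Int) : Int × Int :=
  if n ≤ 1 then (1, 1)
  else
    let s := pvIsqrtLoop n 0 (n + 1)
    let k := (if s * s = n then s else s + 1) - 1
    if n ≤ k * k + k then (k, k + 1)
    else if n ≤ k * k + 2 * k then (k, k + 2)
    else (k + 1, k + 1)

-- ===== PRECONDITION & SPEC =====
def Spec_n_to_grid_size (n : Int) (out : Int × Int) : Prop := out = n_to_grid_size_alt n
instance (n : Int) (out : Int × Int) : Decidable (Spec_n_to_grid_size n out) := by unfold Spec_n_to_grid_size; infer_instance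

-- ===== CLAIM (what is proved, stated in full; the proofs are below) =====
def Claim_equal_n_to_grid_size : Prop := ∀ (n : Int), Dom_n_to_grid_size n → Spec_n_to_grid_size n (n_to_grid_size n)

-- ===== LEMMAS AND PROOFS =====

-- the bisection returns the integer square root
lemma pvIsqrtLoop_spec (n : Int) : ∀ lo hi : Int, 0 ≤ lo → lo < hi →
    lo * lo ≤ n → n < hi * hi →
    0 ≤ pvIsqrtLoop n lo hi ∧ pvIsqrtLoop n lo hi * pvIsqrtLoop n lo hi ≤ n ∧
      n < (pvIsqrtLoop n lo hi + 1) * (pvIsqrtLoop n lo hi + 1) := by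
  intro lo hi
  induction lo, hi using pvIsqrtLoop.induct n with
  | case1 lo hi hgt mid hle ih =>
    intro h0 _hlt hlo hhi
    have hb := PySem.Int.floordiv_two_mid_bounds (lo := lo) (hi := hi) (by omega)
    rw [pvIsqrtLoop, dif_pos hgt]
    simp only [mid] at *
    rw [if_pos hle]
    refine ih (by omega) ?_ hle hhi
    rcases lt_or_eq_of_le hb.2 with h | h
    · exact h
    · rw [h] at hle; linarith
  | case2 lo hi hgt mid hgt2 ih =>
    intro h0 _hlt hlo hhi
    have hb := PySem.Int.floordiv_two_mid_bounds (lo := lo) (hi := hi) (by omega)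
    rw [pvIsqrtLoop, dif_pos hgt]
    simp only [mid] at *
    rw [if_neg hgt2]
    refine ih h0 ?_ hlo (by omega)
    rcases lt_or_eq_of_le hb.1 with h | h
    · exact h
    · rw [← h] at hgt2; exact absurd hlo hgt2
  | case3 lo hi hle =>
    intro h0 hlt hlo hhi
    rw [pvIsqrtLoop, dif_neg hle]
    have : hi = lo + 1 := by omega
    subst this
    exact ⟨h0, hlo, hhi⟩

-- B's value on the band r*r ≤ n < (r+1)*(r+1), r ≥ 1, n ≥ 2
lemma alt_band (n r : Int) (hr : 1 ≤ r) (hn2 : 2 ≤ n)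
    (hlo : r * r ≤ n) (hhi : n < (r + 1) * (r + 1)) :
    n_to_grid_size_alt n =
      if n = r * r then (r, r)
      else if n ≤ r * r + r then (r, r + 1)
      else if n ≤ r * r + 2 * r then (r, r + 2)
      else (r, r) := by
  have hnn : ¬ n ≤ 1 := by omega
  have hs := pvIsqrtLoop_spec n 0 (n + 1) (by omega) (by omega) (by omega) (by nlinarith)
  set s := pvIsqrtLoop n 0 (n + 1) with hsdef
  have hsr : s = r := by
    rcases lt_trichotomy s r with h | h | h
    · have : (s + 1) * (s + 1) ≤ r * r := mul_self_le_mul_self (by omega) (by omega)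
      linarith [hs.2.2]
    · exact h
    · have : (r + 1) * (r + 1) ≤ s * s := mul_self_le_mul_self (by omega) (by omega)
      linarith [hs.2.1]
  unfold n_to_grid_size_alt
  rw [if_neg hnn]
  simp only [← hsdef, hsr]
  by_cases hsq : r * r = n
  · rw [if_pos hsq]
    have h1 : ¬ n ≤ (r - 1) * (r - 1) + (r - 1) := by nlinarith
    have h2 : ¬ n ≤ (r - 1) * (r - 1) + 2 * (r - 1) := by nlinarith
    rw [if_neg h1, if_neg h2, if_pos hsq.symm]
    simp only [Prod.mk.injEq]
    omega
  · rw [if_neg hsq]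
    have e : r + 1 - 1 = r := by ring
    rw [e, if_neg (show ¬ n = r * r from fun h => hsq h.symm)]
    split_ifs <;> first | rfl | (exfalso; nlinarith)

-- pvLoopA only depends on the value of cols (proof irrelevance)
lemma pvLoopA_arg_eq (n c c' r : Int) (h : c = c') (p1 : 1 ≤ r) (p2 : r ≤ c) :
    pvLoopA n c r p1 p2 = pvLoopA n c' r p1 (h ▸ p2) := by subst h; rfl

-- A's loop from the diagonal state (r, r) equals B, for every r ≥ 1 with r*r ≤ n
lemma loopA_diag (n : Int) : ∀ m : ℕ, ∀ r : Int, (n - r * r).toNat = m → 1 ≤ r → r * r ≤ n →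
    ∀ (h1 : (1:Int) ≤ r) (h2 : r ≤ r), pvLoopA n r r h1 h2 = n_to_grid_size_alt n := by
  intro m
  induction m using Nat.strong_induction_on with
  | _ m ih =>
    intro r hm hr hle h1 h2
    rcases eq_or_lt_of_le hle with heq | hlt
    · -- n = r*r : the loop exits immediately with (r, r)
      rw [pvLoopA, dif_neg (by rw [← heq]; exact lt_irrefl _)]
      by_cases hn1 : n ≤ 1
      · have hr1 : r = 1 := by nlinarith [sq_nonneg (r - 1)]
        subst hr1
        unfold n_to_grid_size_alt
        rw [if_pos hn1]
      · rw [alt_band n r hr (by omega) hle (by nlinarith), if_pos heq.symm]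
    · -- n > r*r : unfold up to three loop steps
      have hn2 : 2 ≤ n := by nlinarith
      rw [pvLoopA, dif_pos hlt, dif_pos (by omega)]
      by_cases hb1 : n ≤ (r + 1) * r
      · rw [pvLoopA, dif_neg (not_lt.mpr hb1)]
        rw [alt_band n r hr hn2 hle (by nlinarith)]
        rw [if_neg (by intro h; rw [h] at hlt; exact lt_irrefl _ hlt), if_pos (by linarith)]
      · rw [pvLoopA, dif_pos (not_le.mp hb1), dif_pos (by omega)]
        by_cases hb2 : n ≤ (r + 1 + 1) * r
        · rw [pvLoopA, dif_neg (not_lt.mpr hb2)]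
          rw [alt_band n r hr hn2 hle (by nlinarith)]
          rw [if_neg (by intro h; rw [h] at hlt; exact lt_irrefl _ hlt),
              if_neg (by intro h; apply hb1; linarith), if_pos (by linarith)]
          have e2 : r + 1 + 1 = r + 2 := by ring
          rw [e2]
        · rw [pvLoopA, dif_pos (not_le.mp hb2), dif_neg (by omega)]
          have hsq : (r + 1) * (r + 1) ≤ n := by nlinarith
          rw [pvLoopA_arg_eq n (r + 1 + 1 - 1) (r + 1) (r + 1) (by ring)]
          refine ih (n - (r + 1) * (r + 1)).toNat ?_ (r + 1) rfl (by omega) hsq _ _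
          rw [← hm]
          exact pvToNatLt (by nlinarith) (by linarith)

-- ===== VERDICT (by name: the statement is the Claim_ definition above) =====
theorem n_to_grid_size_spec : Claim_equal_n_to_grid_size := by
  intro n _
  unfold Spec_n_to_grid_size n_to_grid_size
  by_cases hn1 : n ≤ 1
  · rw [pvLoopA, dif_neg (by omega)]
    unfold n_to_grid_size_alt
    rw [if_pos hn1]
  · exact loopA_diag n (n - 1).toNat 1 (by omega) (by omega) (by omega) _ _
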